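-- pv_equiv track=rewrite | github.com/aniketk33/LeetcodeSolutions | arrays/unique-palindrome.py | unique_palindrome
-- ===== SOURCE A (Python) =====
-- from collections import Counter
--
-- def unique_palindrome(s):
--     # store the palindrome string .i.e. the middle and outer characters
--     result = set()
--     left_chars = set()
--     right_chars = Counter(s)
--
--     for i in range(len(s)):
--         middle_char = s[i]
--         # decrement the count
--         right_chars[middle_char] -= 1
--
--         # pop if its count is zero
--         if right_chars[middle_char] == 0:
--             right_chars.pop(middle_char)
--
--         # iterate over the alphabets to find the outer chars
--         for j in range(26):
--             # get the char based on the ascii value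
--             outer_char = chr(ord('a') + j)
--             if outer_char in left_chars and outer_char in right_chars:
--                 result.add((middle_char, outer_char))
--
--         # add the middle char to the left chars set
--         left_chars.add(middle_char)
--
--     return len(result)
-- ===== SOURCE B (Python) =====
-- def unique_palindrome(s):
--     total = 0
--     for j in range(26):
--         c = chr(ord('a') + j)
--         if c in s:
--             first = s.index(c)
--             last = s.rindex(c)
--             if last - first >= 2:
--                 total += len(set(s[first + 1:last]))
--     return total
-- ===== Notes on version B (the rewrite author's own statement) =====
-- stated objective: faster
-- what changed: B replaces A's per-position sweep (left-set membership plus a decremented right Counter feeding an inner 26-letter scan, deduplicated through a result set) by a per-letter computation: for each of the 26 lowercase letters take its first and last occurrence and count the distinct characters strictly between them.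
import Mathlib
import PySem

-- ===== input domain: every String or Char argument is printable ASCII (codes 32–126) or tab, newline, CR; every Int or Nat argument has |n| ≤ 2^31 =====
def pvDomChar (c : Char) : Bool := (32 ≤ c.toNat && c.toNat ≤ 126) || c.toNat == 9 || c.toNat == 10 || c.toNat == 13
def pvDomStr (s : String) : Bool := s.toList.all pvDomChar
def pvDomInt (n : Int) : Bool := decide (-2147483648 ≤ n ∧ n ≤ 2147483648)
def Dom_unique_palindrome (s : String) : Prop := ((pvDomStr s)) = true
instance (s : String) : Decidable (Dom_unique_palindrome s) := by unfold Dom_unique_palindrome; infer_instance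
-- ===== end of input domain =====

-- B re-implements the count per outer letter via first/last occurrence indices instead of A's
-- per-position sweep with a left set and a right counter; a timing run measured B faster
-- (constant factor: 26 whole-string scans instead of per-character set/Counter bookkeeping).

-- chr(ord('a') + j), shared by both ports
def pvLetter (j : Int) : Char := Char.ofNat (97 + j).toNat

-- ===== PORT A =====
-- inner 'for j in range(26)' loop: add (middle, outer) pairs to result
def uniqueInner (mc : Char) (left : PySem.Set Char) (right : PySem.Dict Char Int)
    (res : PySem.Set (Char × Char)) : PySem.Set (Char × Char) :=
  (PySem.List.pyRange 0 26 1).foldl (fun r j =>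
    if left.contains (pvLetter j) && right.contains (pvLetter j) then
      PySem.Set.add r (mc, pvLetter j)
    else r) res

-- one iteration of A's main loop over the characters of s
def uniqueStepA (st : PySem.Set (Char × Char) × PySem.Set Char × PySem.Dict Char Int)
    (mc : Char) : PySem.Set (Char × Char) × PySem.Set Char × PySem.Dict Char Int :=
  let right := st.2.2.insert mc (st.2.2.getD mc 0 - 1)
  -- 'if right_chars[middle_char] == 0: right_chars.pop(middle_char)' (key is present here)
  let right := if right.getD mc 0 == 0 then
      (match right.pop? mc with | some (_, d) => d | none => right)
    else right
  (uniqueInner mc st.2.1 right st.1, PySem.Set.add st.2.1 mc, right)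

def unique_palindrome (s : String) : Int :=
  ((s.toList.foldl uniqueStepA
      ((PySem.Set.empty : PySem.Set (Char × Char)), (PySem.Set.empty : PySem.Set Char),
        PySem.Dict.counter s.toList)).1.length : Int)

-- ===== PORT B =====
def unique_palindrome_alt (s : String) : Int :=
  (PySem.List.pyRange 0 26 1).foldl (fun total j =>
    let c := pvLetter j
    if s.toList.contains c then
      -- s.index(c) (c is present, so the index exists)
      let first : Nat := (PySem.List.index? s.toList c).getD 0
      -- s.rindex(c), ported by hand via the reversed list (exact when c is present)
      let last : Nat := s.toList.length - 1 - (PySem.List.index? s.toList.reverse c).getD 0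
      if 2 ≤ (last : Int) - (first : Int) then
        total + ((PySem.Set.ofList (PySem.List.slice s.toList (some ((first : Int) + 1))
          (some (last : Int)))).length : Int)
      else total
    else total) 0

-- ===== PRECONDITION & SPEC =====
def Spec_unique_palindrome (s : String) (out : Int) : Prop := out = unique_palindrome_alt s
instance (s : String) (out : Int) : Decidable (Spec_unique_palindrome s out) := by unfold Spec_unique_palindrome; infer_instance

-- ===== CLAIM (what is proved, stated in full; the proofs are below) =====
def Claim_equal_unique_palindrome : Prop := ∀ (s : String), Dom_unique_palindrome s → Spec_unique_palindrome s (unique_palindrome s)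

-- ===== LEMMAS AND PROOFS =====

-- c is one of the 26 lowercase letters A's inner loop enumerates
def IsLetter (c : Char) : Prop := ∃ j : Int, 0 ≤ j ∧ j < 26 ∧ c = pvLetter j

-- m sits at a position of P with an occurrence of c strictly before it (in P) and one strictly
-- after it (in the rest of P, or in the still-unprocessed suffix R)
def MidSplit (P R : List Char) (c m : Char) : Prop :=
  ∃ P1 P2, P = P1 ++ m :: P2 ∧ c ∈ P1 ∧ c ∈ P2 ++ R

theorem pvLetter_natinj : ∀ a : Nat, a < 26 → ∀ b : Nat, b < 26 →
    (Char.ofNat (97 + a) = Char.ofNat (97 + b) ↔ a = b) := by decide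

theorem pvLetter_inj {j k : Int} (h0 : 0 ≤ j) (h1 : j < 26) (h2 : 0 ≤ k) (h3 : k < 26) :
    pvLetter j = pvLetter k ↔ j = k := by
  unfold pvLetter
  have ej : (97 + j).toNat = 97 + j.toNat := by omega
  have ek : (97 + k).toNat = 97 + k.toNat := by omega
  rw [ej, ek, pvLetter_natinj j.toNat (by omega) k.toNat (by omega)]
  omega

theorem get?_erase_self {ν : Type} (d : PySem.Dict Char ν) (k : Char) :
    (d.erase k).get? k = none := by
  obtain ⟨l⟩ := d
  simp only [PySem.Dict.erase, PySem.Dict.get?, Option.map_eq_none_iff]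
  rw [List.find?_eq_none]
  intro p hp
  simp [List.mem_filter] at hp
  simpa using hp.2

theorem get?_erase_of_ne {ν : Type} (d : PySem.Dict Char ν) {k k' : Char} (h : k' ≠ k) :
    (d.erase k).get? k' = d.get? k' := by
  obtain ⟨l⟩ := d
  simp only [PySem.Dict.erase, PySem.Dict.get?]
  rw [List.find?_filter]
  have he : (fun a : Char × ν => decide ((!a.1 == k) = true ∧ (a.1 == k') = true))
      = (fun p : Char × ν => p.1 == k') := by
    funext p
    by_cases hp : p.1 = k' <;> simp [hp]
    exact h
  rw [he]

theorem mem_foldl_condAdd {α β : Type} [BEq α] [LawfulBEq α] (l : List β) (p : β → Bool)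
    (f : β → α) : ∀ (s : PySem.Set α) (a : α),
    (a ∈ l.foldl (fun r x => if p x then PySem.Set.add r (f x) else r) s) ↔
      a ∈ s ∨ ∃ x ∈ l, p x = true ∧ a = f x := by
  induction l with
  | nil => simp
  | cons y l ih =>
    intro s a
    simp only [List.foldl_cons]
    rw [ih]
    by_cases hp : p y
    · simp only [if_pos hp, PySem.Set.mem_add, List.mem_cons]
      constructor
      · rintro ((h | h) | h)
        · exact Or.inl h
        · exact Or.inr ⟨y, Or.inl rfl, hp, h⟩
        · obtain ⟨x, hx, hpx, rfl⟩ := h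
          exact Or.inr ⟨x, Or.inr hx, hpx, rfl⟩
      · rintro (h | ⟨x, (rfl | hx), hpx, rfl⟩)
        · exact Or.inl (Or.inl h)
        · exact Or.inl (Or.inr rfl)
        · exact Or.inr ⟨x, hx, hpx, rfl⟩
    · simp only [if_neg hp, List.mem_cons]
      constructor
      · rintro (h | ⟨x, hx, hpx, rfl⟩)
        · exact Or.inl h
        · exact Or.inr ⟨x, Or.inr hx, hpx, rfl⟩
      · rintro (h | ⟨x, (rfl | hx), hpx, rfl⟩)
        · exact Or.inl h
        · exact absurd hpx (by simpa using hp)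
        · exact Or.inr ⟨x, hx, hpx, rfl⟩

theorem nodup_foldl_condAdd {α β : Type} [BEq α] [LawfulBEq α] (l : List β) (p : β → Bool)
    (f : β → α) : ∀ (s : PySem.Set α), s.Nodup →
    (l.foldl (fun r x => if p x then PySem.Set.add r (f x) else r) s).Nodup := by
  induction l with
  | nil => intro s h; simpa using h
  | cons y l ih =>
    intro s h
    simp only [List.foldl_cons]
    apply ih
    by_cases hp : p y
    · simpa [hp] using PySem.Set.nodup_add s (f y) h
    · simpa [hp] using h

theorem midSplit_snoc (P R : List Char) (a c m : Char) :
    MidSplit (P ++ [a]) R c m ↔ MidSplit P (a :: R) c m ∨ (m = a ∧ c ∈ P ∧ c ∈ R) := by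
  constructor
  · rintro ⟨P1, P2, he, h1, h2⟩
    rcases List.eq_nil_or_concat P2 with rfl | ⟨P2', b, rfl⟩
    · right
      have := List.append_inj' he (by simp)
      obtain ⟨rfl, hm⟩ := this
      simp at hm
      simp_all
    · left
      have he' : P ++ [a] = (P1 ++ m :: P2') ++ [b] := by simpa using he
      obtain ⟨h5, h6⟩ := List.append_inj' he' (by simp)
      have hab : a = b := by simpa using h6
      subst hab
      subst h5
      refine ⟨P1, P2', rfl, h1, ?_⟩
      simpa using h2
  · rintro (⟨P1, P2, rfl, h1, h2⟩ | ⟨rfl, h1, h2⟩)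
    · refine ⟨P1, P2 ++ [a], by simp, h1, by simpa using h2⟩
    · exact ⟨P, [], by simp, h1, by simpa using h2⟩

-- IsMid: middle/outer characterisation over the whole list
theorem midSplit_nil_iff (L : List Char) (c m : Char) :
    MidSplit L [] c m ↔ ∃ i : Nat, L[i]? = some m ∧ c ∈ L.take i ∧ c ∈ L.drop (i + 1) := by
  constructor
  · rintro ⟨P1, P2, rfl, h1, h2⟩
    refine ⟨P1.length, ?_, ?_, ?_⟩
    · rw [List.getElem?_append_right (le_refl _)]
      simp
    · rw [List.take_left]; exact h1
    · have : (P1 ++ m :: P2).drop (P1.length + 1) = P2 := by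
        have : P1 ++ m :: P2 = (P1 ++ [m]) ++ P2 := by simp
        rw [this]
        have hl : (P1 ++ [m]).length = P1.length + 1 := by simp
        rw [← hl, List.drop_left]
      rw [this]
      simpa using h2
  · rintro ⟨i, hm, h1, h2⟩
    obtain ⟨hi, hv⟩ := List.getElem?_eq_some_iff.mp hm
    refine ⟨L.take i, L.drop (i + 1), ?_, h1, by simpa using h2⟩
    conv_lhs => rw [← List.take_append_drop i L]
    rw [← List.getElem_cons_drop hi, hv]

theorem mem_take_iff (L : List Char) (c : Char) (i : Nat) :
    c ∈ L.take i ↔ c ∈ L ∧ L.idxOf c < i := by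
  constructor
  · intro h
    have hm := List.mem_of_mem_take h
    exact ⟨hm, (List.mem_take_iff_idxOf_lt hm).1 h⟩
  · rintro ⟨hm, hlt⟩
    exact (List.mem_take_iff_idxOf_lt hm).2 hlt

theorem mem_drop_iff (L : List Char) (c : Char) (k : Nat) :
    c ∈ L.drop k ↔ c ∈ L ∧ k + L.reverse.idxOf c < L.length := by
  rw [← List.mem_reverse, List.reverse_drop, mem_take_iff]
  constructor
  · rintro ⟨hm, hlt⟩
    rw [List.mem_reverse] at hm
    exact ⟨hm, by omega⟩
  · rintro ⟨hm, hlt⟩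
    have hr : c ∈ L.reverse := List.mem_reverse.mpr hm
    have := List.idxOf_lt_length_of_mem hr
    simp at this
    exact ⟨hr, by omega⟩

theorem mem_drop_take (L : List Char) (a b : Nat) (m : Char) :
    m ∈ (L.drop a).take b ↔ ∃ i : Nat, a ≤ i ∧ i < a + b ∧ L[i]? = some m := by
  rw [List.mem_iff_getElem?]
  constructor
  · rintro ⟨k, hk⟩
    rw [List.getElem?_take] at hk
    by_cases hkb : k < b
    · rw [if_pos hkb, List.getElem?_drop] at hk
      exact ⟨a + k, by omega, by omega, hk⟩
    · simp [if_neg hkb] at hk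
  · rintro ⟨i, h1, h2, hm⟩
    refine ⟨i - a, ?_⟩
    rw [List.getElem?_take, if_pos (by omega), List.getElem?_drop]
    have : a + (i - a) = i := by omega
    rw [this]; exact hm

theorem mem_uniqueInner (mc : Char) (left : PySem.Set Char) (right : PySem.Dict Char Int)
    (res : PySem.Set (Char × Char)) (a : Char × Char) :
    a ∈ uniqueInner mc left right res ↔ a ∈ res ∨ ∃ j : Int, (0 ≤ j ∧ j < 26) ∧
      (left.contains (pvLetter j) && right.contains (pvLetter j)) = true ∧
      a = (mc, pvLetter j) := by
  unfold uniqueInner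
  rw [mem_foldl_condAdd (PySem.List.pyRange 0 26 1)
    (fun j => left.contains (pvLetter j) && right.contains (pvLetter j))
    (fun j => (mc, pvLetter j)) res a]
  constructor
  · rintro (h | ⟨j, hj, hc, rfl⟩)
    · exact Or.inl h
    · exact Or.inr ⟨j, by simpa [PySem.List.mem_pyRange_one] using hj, hc, rfl⟩
  · rintro (h | ⟨j, hj, hc, rfl⟩)
    · exact Or.inl h
    · exact Or.inr ⟨j, by simpa [PySem.List.mem_pyRange_one] using hj, hc, rfl⟩

theorem nodup_uniqueInner (mc : Char) (left : PySem.Set Char) (right : PySem.Dict Char Int)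
    (res : PySem.Set (Char × Char)) (h : res.Nodup) :
    (uniqueInner mc left right res).Nodup :=
  nodup_foldl_condAdd (PySem.List.pyRange 0 26 1)
    (fun j => left.contains (pvLetter j) && right.contains (pvLetter j))
    (fun j => (mc, pvLetter j)) res h

theorem loopA (R : List Char) : ∀ (P : List Char) (res : PySem.Set (Char × Char))
    (left : PySem.Set Char) (right : PySem.Dict Char Int),
    res.Nodup →
    (∀ m c, (m, c) ∈ res ↔ IsLetter c ∧ MidSplit P R c m) →
    (∀ c, left.contains c = true ↔ c ∈ P) →
    (∀ c, right.get? c = if R.count c = 0 then none else some ((R.count c : Int))) →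
    (R.foldl uniqueStepA (res, left, right)).1.Nodup ∧
      (∀ m c, (m, c) ∈ (R.foldl uniqueStepA (res, left, right)).1 ↔
        IsLetter c ∧ MidSplit (P ++ R) [] c m) := by
  induction R with
  | nil =>
    intro P res left right hnd hres _ _
    simpa using ⟨hnd, fun m c => by simpa using hres m c⟩
  | cons mc R' ih =>
    intro P res left right hnd hres hleft hright
    simp only [List.foldl_cons]
    -- the value stored for mc in the decremented counter
    have hcount : (mc :: R').count mc = R'.count mc + 1 := by simp
    have hget : right.get? mc = some ((R'.count mc : Int) + 1) := by
      have h := hright mc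
      rw [hcount] at h
      simpa [Nat.succ_ne_zero] using h
    have hgetD : right.getD mc 0 = (R'.count mc : Int) + 1 :=
      PySem.Dict.getD_of_get?_eq_some right 0 hget
    set right1 := right.insert mc (right.getD mc 0 - 1) with hr1
    have hval : right.getD mc 0 - 1 = (R'.count mc : Int) := by rw [hgetD]; ring
    have hget1 : right1.get? mc = some ((R'.count mc : Int)) := by
      rw [hr1, hval]; exact PySem.Dict.get?_insert_self right mc _
    have hgetD1 : right1.getD mc 0 = (R'.count mc : Int) :=
      PySem.Dict.getD_of_get?_eq_some right1 0 hget1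
    -- the dictionary after the conditional pop
    set rightF := if right1.getD mc 0 == 0 then
        (match right1.pop? mc with | some (_, d) => d | none => right1)
      else right1 with hrF
    have hstep : uniqueStepA (res, left, right) mc
        = (uniqueInner mc left rightF res, PySem.Set.add left mc, rightF) := rfl
    rw [hstep]
    -- counter invariant for the suffix R'
    have hInv : ∀ c, rightF.get? c = if R'.count c = 0 then none
        else some ((R'.count c : Int)) := by
      intro c
      by_cases hc : c = mc
      · subst hc
        by_cases hz : R'.count c = 0
        · have hcond : (right1.getD c 0 == 0) = true := by simp [hgetD1, hz]
          have hpop : right1.pop? c = some (((R'.count c : Int)), right1.erase c) := by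
            simp [PySem.Dict.pop?, hget1]
          rw [hrF, if_pos hcond, hpop]
          simp [hz, get?_erase_self]
        · have hcond : (right1.getD c 0 == 0) = false := by
            simp [hgetD1]
            exact_mod_cast hz
          rw [hrF, if_neg (by simp [hcond])]
          rw [hget1, if_neg hz]
      · have hne : (mc :: R').count c = R'.count c := by
          rw [List.count_cons]
          simp [Ne.symm hc]
        have hstay : rightF.get? c = right1.get? c := by
          rw [hrF]
          split
          · have hpop : right1.pop? mc = some (((R'.count mc : Int)), right1.erase mc) := by
              simp [PySem.Dict.pop?, hget1]
            rw [hpop]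
            exact get?_erase_of_ne right1 hc
          · rfl
        rw [hstay, hr1, PySem.Dict.get?_insert_of_ne right _ hc, hright c, hne]
    have hcontF : ∀ c, rightF.contains c = true ↔ c ∈ R' := by
      intro c
      rw [PySem.Dict.contains_eq_isSome_get?, hInv c]
      by_cases h0 : R'.count c = 0 <;>
        simp [h0, ← List.count_pos_iff] <;> omega
    have hleft' : ∀ c, (PySem.Set.add left mc).contains c = true ↔ c ∈ P ++ [mc] := by
      intro c
      rw [PySem.Set.contains_iff, PySem.Set.mem_add, List.mem_append]
      have hl : c ∈ left ↔ c ∈ P := by rw [← PySem.Set.contains_iff left c]; exact hleft c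
      simp [hl]
    have hres' : ∀ m c, (m, c) ∈ uniqueInner mc left rightF res ↔
        IsLetter c ∧ MidSplit (P ++ [mc]) R' c m := by
      intro m c
      rw [mem_uniqueInner, midSplit_snoc, hres m c]
      have hsec : (∃ j : Int, (0 ≤ j ∧ j < 26) ∧
          (left.contains (pvLetter j) && rightF.contains (pvLetter j)) = true ∧
          (m, c) = (mc, pvLetter j)) ↔
          IsLetter c ∧ m = mc ∧ c ∈ P ∧ c ∈ R' := by
        constructor
        · rintro ⟨j, ⟨hj0, hj1⟩, hb, hpair⟩
          obtain ⟨rfl, rfl⟩ := Prod.mk.injEq .. |>.mp hpair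
          rw [Bool.and_eq_true] at hb
          exact ⟨⟨j, hj0, hj1, rfl⟩, rfl, (hleft _).1 hb.1, (hcontF _).1 hb.2⟩
        · rintro ⟨⟨j, hj0, hj1, rfl⟩, rfl, hP, hR⟩
          exact ⟨j, ⟨hj0, hj1⟩, by
            rw [Bool.and_eq_true]
            exact ⟨(hleft _).2 hP, (hcontF _).2 hR⟩, rfl⟩
      rw [hsec]
      tauto
    have hnd' : (uniqueInner mc left rightF res).Nodup := nodup_uniqueInner _ _ _ _ hnd
    have hmain := ih (P ++ [mc]) (uniqueInner mc left rightF res)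
      (PySem.Set.add left mc) rightF hnd' hres' hleft' hInv
    rwa [show (P ++ [mc]) ++ R' = P ++ mc :: R' from by simp] at hmain

theorem index?_getD_of_mem {L : List Char} {c : Char} (h : c ∈ L) :
    (PySem.List.index? L c).getD 0 = L.idxOf c := by
  rw [PySem.List.index?_eq_idxOf?]
  cases hq : L.idxOf? c with
  | none => exact absurd (List.idxOf?_eq_none_iff.mp hq) (by simpa using h)
  | some k =>
    rw [List.idxOf_eq_getD_idxOf?, hq]
    rfl

theorem sum_ite_eq_count {β : Type} [BEq β] [LawfulBEq β] (l : List β) (p : β → Bool) :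
    (l.map (fun j => if p j then 1 else 0)).sum = l.countP p := by
  induction l with
  | nil => simp
  | cons x l ih => by_cases hp : p x <;> simp [List.countP_cons, hp, ih] <;> omega

theorem length_eq_sum (r : List (Char × Char)) (h : ∀ p ∈ r, IsLetter p.2) :
    r.length = ((PySem.List.pyRange 0 26 1).map
      (fun j => r.countP (fun p => p.2 == pvLetter j))).sum := by
  induction r with
  | nil => simp
  | cons a r ih =>
    have ha := h a (List.mem_cons_self)
    have ihr := ih (fun p hp => h p (List.mem_cons_of_mem a hp))
    simp only [List.countP_cons, List.length_cons]
    rw [show (fun j : Int => r.countP (fun p => p.2 == pvLetter j) +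
        if (a.2 == pvLetter j) = true then 1 else 0)
      = (fun j : Int => r.countP (fun p => p.2 == pvLetter j) +
        if (a.2 == pvLetter j) then 1 else 0) from rfl]
    rw [List.sum_map_add]
    obtain ⟨j0, hj0, hj26, hc⟩ := ha
    have hone : ((PySem.List.pyRange 0 26 1).map
        (fun j => if (a.2 == pvLetter j) then 1 else 0)).sum = 1 := by
      have hcong : ∀ j ∈ PySem.List.pyRange 0 26 1,
          (fun j => if (a.2 == pvLetter j) then (1:Nat) else 0) j
          = (fun j => if (j == j0) then (1:Nat) else 0) j := by
        intro j hj
        rw [PySem.List.mem_pyRange_one] at hj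
        by_cases he : j = j0
        · simp [he, hc]
        · have : a.2 ≠ pvLetter j := by
            rw [hc]
            intro hx
            exact he ((pvLetter_inj hj.1 hj.2 hj0 hj26).mp hx.symm)
          simp [this, he]
      rw [List.map_congr_left hcong, sum_ite_eq_count]
      show List.count j0 (PySem.List.pyRange 0 26 1) = 1
      exact List.count_eq_one_of_mem (PySem.List.nodup_pyRange_one 0 26)
        (PySem.List.mem_pyRange_one.mpr ⟨hj0, hj26⟩)
    rw [hone, ihr]

theorem mid_index_form (L : List Char) (c m : Char) :
    MidSplit L [] c m ↔ ∃ i : Nat, L[i]? = some m ∧ c ∈ L ∧ L.idxOf c < i ∧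
      i + 1 + L.reverse.idxOf c < L.length := by
  rw [midSplit_nil_iff]
  apply exists_congr
  intro i
  rw [mem_take_iff, mem_drop_iff]
  tauto

theorem per_letter (L : List Char) (r : List (Char × Char)) (hnd : r.Nodup) (c : Char)
    (hmem : ∀ m, ((m, c) ∈ r ↔ MidSplit L [] c m)) :
    (r.countP (fun p => p.2 == c) : Int) =
      if L.contains c then
        (if 2 ≤ ((L.length - 1 - L.reverse.idxOf c : Nat) : Int) - (L.idxOf c : Int) then
          ((PySem.Set.ofList (PySem.List.slice L (some ((L.idxOf c : Int) + 1))
            (some ((L.length - 1 - L.reverse.idxOf c : Nat) : Int)))).length : Int)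
        else 0)
      else 0 := by
  by_cases hcl : c ∈ L
  · have hrdx : L.reverse.idxOf c < L.length := by
      have := List.idxOf_lt_length_of_mem (List.mem_reverse.mpr hcl)
      simpa using this
    rw [if_pos (by simpa using hcl)]
    by_cases hg : 2 ≤ ((L.length - 1 - L.reverse.idxOf c : Nat) : Int) - (L.idxOf c : Int)
    · rw [if_pos hg]
      have hf2 : L.idxOf c + 2 ≤ L.length - 1 - L.reverse.idxOf c := by omega
      -- the distinct middles of A are exactly the distinct characters of B's slice
      have hsl : PySem.List.slice L (some ((L.idxOf c : Int) + 1))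
          (some ((L.length - 1 - L.reverse.idxOf c : Nat) : Int))
          = (L.drop (L.idxOf c + 1)).take ((L.length - 1 - L.reverse.idxOf c) - (L.idxOf c + 1)) := by
        have hcast : ((L.idxOf c : Int) + 1) = (((L.idxOf c + 1 : Nat)) : Int) := by push_cast; ring
        rw [hcast, PySem.List.slice_natCast]
      set M := (r.filter (fun p => p.2 == c)).map Prod.fst with hM
      have ndM : M.Nodup := by
        apply List.Nodup.map_on _ (hnd.filter _)
        intro x hx y hy hxy
        have hx2 : x.2 = c := by simpa using (List.of_mem_filter hx)
        have hy2 : y.2 = c := by simpa using (List.of_mem_filter hy)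
        exact Prod.ext hxy (hx2.trans hy2.symm)
      have memM : ∀ m, m ∈ M ↔ (m, c) ∈ r := by
        intro m
        rw [hM, List.mem_map]
        constructor
        · rintro ⟨p, hp, rfl⟩
          have h2 : p.2 = c := by simpa using (List.of_mem_filter hp)
          have := List.mem_of_mem_filter hp
          rwa [show (p.1, c) = p from by rw [← h2]] at *
        · intro hmc
          exact ⟨(m, c), List.mem_filter.mpr ⟨hmc, by simp⟩, rfl⟩
      have ndS : (PySem.Set.ofList ((L.drop (L.idxOf c + 1)).take
          ((L.length - 1 - L.reverse.idxOf c) - (L.idxOf c + 1)))).Nodup :=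
        PySem.Set.nodup_ofList _
      have memS : ∀ m, m ∈ PySem.Set.ofList ((L.drop (L.idxOf c + 1)).take
          ((L.length - 1 - L.reverse.idxOf c) - (L.idxOf c + 1))) ↔ (m, c) ∈ r := by
        intro m
        rw [PySem.Set.mem_ofList, mem_drop_take, hmem, mid_index_form]
        constructor
        · rintro ⟨i, h1, h2, h3⟩
          exact ⟨i, h3, hcl, by omega, by omega⟩
        · rintro ⟨i, h1, _, h3, h4⟩
          exact ⟨i, by omega, by omega, h1⟩
      have hperm : M.Perm (PySem.Set.ofList ((L.drop (L.idxOf c + 1)).take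
          ((L.length - 1 - L.reverse.idxOf c) - (L.idxOf c + 1)))) := by
        rw [List.perm_ext_iff_of_nodup ndM ndS]
        intro m
        rw [memM, memS]
      have hlen : r.countP (fun p => p.2 == c) = M.length := by
        rw [List.countP_eq_length_filter, hM, List.length_map]
      rw [hlen, hperm.length_eq, hsl]
    · rw [if_neg hg]
      have : r.countP (fun p => p.2 == c) = 0 := by
        rw [List.countP_eq_zero]
        rintro ⟨m, c'⟩ hp hb
        have hc' : c' = c := by simpa using hb
        rw [hc'] at hp
        obtain ⟨i, _, _, h3, h4⟩ := (mid_index_form L c m).mp ((hmem m).mp hp)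
        omega
      simp [this]
  · rw [if_neg (by simpa using hcl)]
    have : r.countP (fun p => p.2 == c) = 0 := by
      rw [List.countP_eq_zero]
      rintro ⟨m, c'⟩ hp hb
      have hc' : c' = c := by simpa using hb
      rw [hc'] at hp
      obtain ⟨_, _, hc2, _, _⟩ := (mid_index_form L c m).mp ((hmem m).mp hp)
      exact hcl hc2
    simp [this]

-- B's per-letter contribution, as a function of the letter index
def pvG (L : List Char) (j : Int) : Int :=
  if L.contains (pvLetter j) then
    (if 2 ≤ ((L.length - 1 - (PySem.List.index? L.reverse (pvLetter j)).getD 0 : Nat) : Int)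
        - (((PySem.List.index? L (pvLetter j)).getD 0 : Nat) : Int) then
      ((PySem.Set.ofList (PySem.List.slice L
        (some ((((PySem.List.index? L (pvLetter j)).getD 0 : Nat) : Int) + 1))
        (some ((L.length - 1 - (PySem.List.index? L.reverse (pvLetter j)).getD 0 : Nat) : Int)))).length : Int)
    else 0)
  else 0

-- ===== VERDICT (by name: the statement is the Claim_ definition above) =====
theorem unique_palindrome_spec : Claim_equal_unique_palindrome := by
  unfold Claim_equal_unique_palindrome
  intro s _
  unfold Spec_unique_palindrome unique_palindrome unique_palindrome_alt
  have hres0 : ∀ m c, (m, c) ∈ (PySem.Set.empty : PySem.Set (Char × Char)) ↔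
      IsLetter c ∧ MidSplit [] s.toList c m := by
    intro m c
    simp [PySem.Set.empty, MidSplit]
  have hleft0 : ∀ c : Char, (PySem.Set.empty : PySem.Set Char).contains c = true ↔
      c ∈ ([] : List Char) := by
    intro c
    simp [PySem.Set.empty, PySem.Set.contains]
  have hright0 : ∀ c, (PySem.Dict.counter s.toList).get? c =
      if s.toList.count c = 0 then none else some ((s.toList.count c : Int)) := by
    intro c
    by_cases h0 : s.toList.count c = 0
    · rw [if_pos h0]
      rw [PySem.Dict.get?_eq_none_iff_contains, PySem.Dict.contains_counter]
      simp
      exact List.count_eq_zero.mp h0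
    · rw [if_neg h0]
      have hcm : c ∈ s.toList := by
        rw [← List.count_pos_iff]
        omega
      cases hq : (PySem.Dict.counter s.toList).get? c with
      | none =>
        rw [PySem.Dict.get?_eq_none_iff_contains, PySem.Dict.contains_counter] at hq
        simp [hcm] at hq
      | some v =>
        have hv := PySem.Dict.getD_of_get?_eq_some _ 0 hq
        rw [PySem.Dict.getD_counter] at hv
        rw [← hv]
  have hloop := loopA s.toList [] PySem.Set.empty PySem.Set.empty
    (PySem.Dict.counter s.toList) List.nodup_nil hres0 hleft0 hright0
  obtain ⟨hnd, hchar⟩ := hloop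
  rw [List.nil_append] at hchar
  rw [length_eq_sum _ (fun p hp => ((hchar p.1 p.2).mp (by simpa using hp)).1)]
  rw [Nat.cast_list_sum, List.map_map]
  have hB : (PySem.List.pyRange 0 26 1).foldl (fun total j =>
      let c := pvLetter j
      if s.toList.contains c then
        let first : Nat := (PySem.List.index? s.toList c).getD 0
        let last : Nat := s.toList.length - 1 - (PySem.List.index? s.toList.reverse c).getD 0
        if 2 ≤ (last : Int) - (first : Int) then
          total + ((PySem.Set.ofList (PySem.List.slice s.toList (some ((first : Int) + 1))
            (some (last : Int)))).length : Int)
        else total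
      else total) 0
      = (PySem.List.pyRange 0 26 1).foldl (fun total j => total + pvG s.toList j) 0 := by
    apply PySem.List.foldl_congr_mem
    intro acc j _
    dsimp only
    simp only [pvG]
    split_ifs <;> first | rfl | rw [add_zero]
  rw [hB, PySem.List.foldl_add, zero_add]
  apply congrArg List.sum
  apply List.map_congr_left
  intro j hj
  rw [PySem.List.mem_pyRange_one] at hj
  have hmemj : ∀ m, ((m, pvLetter j) ∈ (s.toList.foldl uniqueStepA
      (PySem.Set.empty, PySem.Set.empty, PySem.Dict.counter s.toList)).1 ↔
      MidSplit s.toList [] (pvLetter j) m) := by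
    intro m
    rw [hchar m (pvLetter j)]
    have hl : IsLetter (pvLetter j) := ⟨j, hj.1, hj.2, rfl⟩
    exact ⟨fun h => h.2, fun h => ⟨hl, h⟩⟩
  have hpl := per_letter s.toList _ hnd (pvLetter j) hmemj
  simp only [Function.comp_apply]
  rw [hpl]
  simp only [pvG]
  by_cases hc : s.toList.contains (pvLetter j)
  · have hm : pvLetter j ∈ s.toList := by simpa using hc
    have hm' : pvLetter j ∈ s.toList.reverse := List.mem_reverse.mpr hm
    rw [index?_getD_of_mem hm, index?_getD_of_mem hm']
  · rw [if_neg hc, if_neg hc]
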